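-- pv_equiv track=rewrite | github.com/atipls/advent | advent/2023/1b.py | build_number
-- ===== SOURCE A (Python) =====
-- MAPPING = {
--     "one": 1,
--     "two": 2,
--     "three": 3,
--     "four": 4,
--     "five": 5,
--     "six": 6,
--     "seven": 7,
--     "eight": 8,
--     "nine": 9,
-- }
--
-- def build_number(line: str) -> str:
--     for index, char in enumerate(line):
--         if char in "0123456789":
--             yield char
--
--         mapping = (
--             str(MAPPING[word]) for word in MAPPING
--             if line[index:index+len(word)] == word
--         )
--
--         if found_mapping := next(mapping, None):
--             yield found_mapping
-- ===== SOURCE B (Python) =====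
-- MAPPING = {
--     "one": 1,
--     "two": 2,
--     "three": 3,
--     "four": 4,
--     "five": 5,
--     "six": 6,
--     "seven": 7,
--     "eight": 8,
--     "nine": 9,
-- }
--
-- def build_number(line: str):
--     # Word-major: collect (position, token) hits for digits and for each
--     # spelled word separately, then emit them in position order.
--     hits = []
--     for i, ch in enumerate(line):
--         if ch in "0123456789":
--             hits.append((i, ch))
--     for word, value in MAPPING.items():
--         for start in range(len(line)):
--             if line.startswith(word, start):
--                 hits.append((start, str(value)))
--     hits.sort(key=lambda h: h[0])
--     for _, token in hits:
--         yield token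
-- ===== Notes on version B (the rewrite author's own statement) =====
-- stated objective: alternative
-- what changed: Replaces A's index-major scan with an inner first-match word generator by a word-major pass: digit positions and, per spelled word, all start positions are collected as (position, token) hits, then stably sorted by position and emitted.
import Mathlib
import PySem

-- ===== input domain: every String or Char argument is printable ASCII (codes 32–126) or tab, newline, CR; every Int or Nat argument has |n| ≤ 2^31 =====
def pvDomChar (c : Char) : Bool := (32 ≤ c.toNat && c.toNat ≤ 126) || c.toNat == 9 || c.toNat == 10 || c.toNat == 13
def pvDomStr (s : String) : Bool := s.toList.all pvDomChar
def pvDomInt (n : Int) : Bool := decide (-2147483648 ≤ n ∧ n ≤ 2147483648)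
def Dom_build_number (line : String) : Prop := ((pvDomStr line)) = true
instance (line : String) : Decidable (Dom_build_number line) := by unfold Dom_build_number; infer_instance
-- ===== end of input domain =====

-- B replaces A's index-major scan (inner first-match word generator at every index) by a
-- word-major collection of (position, token) hits followed by a stable sort by position;
-- both are generators in Python, compared here by the list of yielded strings.

-- ===== PORT A =====
-- MAPPING, in insertion order
def pyMAPPING : List (List Char × Int) :=
  [("one".toList, 1), ("two".toList, 2), ("three".toList, 3), ("four".toList, 4),
   ("five".toList, 5), ("six".toList, 6), ("seven".toList, 7), ("eight".toList, 8),
   ("nine".toList, 9)]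

-- A is a generator; the port returns the list of all yielded strings.
-- `char in "0123456789"` on a single char = membership of that char (exact here);
-- `next(gen, None)` over MAPPING = first word whose slice matches (str(v) is never falsy).
def build_number (line : String) : List String :=
  (PySem.List.enumerate line.toList).foldl (fun acc ic =>
    let acc1 := if ("0123456789".toList.contains ic.2) then acc ++ [String.ofList [ic.2]] else acc
    match pyMAPPING.find? (fun wv =>
        PySem.List.slice line.toList (some ic.1) (some (ic.1 + wv.1.length)) == wv.1) with
    | some wv => acc1 ++ [PySem.Int.toStr wv.2]
    | none => acc1) []

-- ===== PORT B =====
-- line.startswith(word, start) with 0 ≤ start is startswith of line[start:] (exact: start ∈ range(len(line))).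
def build_number_alt (line : String) : List String :=
  let hits1 := (PySem.List.enumerate line.toList).foldl (fun acc ic =>
      if ("0123456789".toList.contains ic.2) then acc ++ [(ic.1, String.ofList [ic.2])] else acc) []
  let hits2 := pyMAPPING.foldl (fun acc wv =>
      (PySem.List.pyRange 0 (line.toList.length : Int) 1).foldl (fun acc2 s =>
        if PySem.Chars.startswith (PySem.List.slice line.toList (some s) none) wv.1
        then acc2 ++ [(s, PySem.Int.toStr wv.2)] else acc2) acc) hits1
  (PySem.List.sorted hits2 (fun h => h.1)).map (fun h => h.2)

-- ===== PRECONDITION & SPEC =====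
def Spec_build_number (line : String) (out : List String) : Prop := out = build_number_alt line
instance (line : String) (out : List String) : Decidable (Spec_build_number line out) := by unfold Spec_build_number; infer_instance

-- ===== CLAIM (what is proved, stated in full; the proofs are below) =====
def Claim_equal_build_number : Prop := ∀ (line : String), Dom_build_number line → Spec_build_number line (build_number line)

-- ===== LEMMAS AND PROOFS =====

-- word matches at (Nat) position k
def pvM (L : List Char) (k : Nat) (w : List Char) : Bool := (L.drop k).take w.length == w

-- A's per-index token list
def pvTokA (L : List Char) (ic : Int × Char) : List String :=
  (if ("0123456789".toList.contains ic.2) then [String.ofList [ic.2]] else []) ++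
  (match pyMAPPING.find? (fun wv =>
      PySem.List.slice L (some ic.1) (some (ic.1 + wv.1.length)) == wv.1) with
   | some wv => [PySem.Int.toStr wv.2]
   | none => [])

-- per-index hit lists (pairs), canonical position-ordered hit list
def pvTokD (ic : Int × Char) : List (Int × String) :=
  if ("0123456789".toList.contains ic.2) then [(ic.1, String.ofList [ic.2])] else []

def pvTokW (L : List Char) (i : Int) : List (Int × String) :=
  pyMAPPING.flatMap (fun wv =>
    if PySem.List.slice L (some i) (some (i + wv.1.length)) == wv.1
    then [(i, PySem.Int.toStr wv.2)] else [])

def pvHit (L : List Char) (ic : Int × Char) : List (Int × String) := pvTokD ic ++ pvTokW L ic.1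

def pvC (L : List Char) : List (Int × String) :=
  (PySem.List.enumerate L).flatMap (pvHit L)

-- A as a flatMap over enumerate
lemma pv_A_flatMap (line : String) :
    build_number line = (PySem.List.enumerate line.toList).flatMap (pvTokA line.toList) := by
  unfold build_number
  have hb : (fun (acc : List String) (ic : Int × Char) =>
      let acc1 := if ("0123456789".toList.contains ic.2) then acc ++ [String.ofList [ic.2]] else acc
      match pyMAPPING.find? (fun wv =>
          PySem.List.slice line.toList (some ic.1) (some (ic.1 + wv.1.length)) == wv.1) with
      | some wv => acc1 ++ [PySem.Int.toStr wv.2]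
      | none => acc1) = fun acc ic => acc ++ pvTokA line.toList ic := by
    funext acc ic
    unfold pvTokA
    by_cases h : ("0123456789".toList.contains ic.2) <;>
      cases hf : pyMAPPING.find? (fun wv =>
        PySem.List.slice line.toList (some ic.1) (some (ic.1 + wv.1.length)) == wv.1) <;>
      simp only [h] <;> simp [List.append_assoc]
  rw [hb, PySem.List.foldl_append_eq_flatMap]
  simp

-- the slice test at a cast index is pvM
lemma pv_pA_cast (L : List Char) (k : Nat) (w : List Char) :
    (PySem.List.slice L (some (k : Int)) (some ((k : Int) + (w.length : Int))) == w) = pvM L k w := by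
  rw [PySem.List.slice_natCast_add]
  rfl

-- startswith at a cast start is pvM
lemma pv_pB_cast (L : List Char) (k : Nat) (w : List Char) :
    PySem.Chars.startswith (PySem.List.slice L (some (k : Int)) none) w = pvM L k w := by
  rw [PySem.List.slice_from_natCast]
  have h := PySem.Chars.startswith_iff (L.drop k) w
  rw [List.prefix_iff_eq_take] at h
  unfold pvM
  rw [Bool.eq_iff_iff, h, beq_iff_eq]
  exact ⟨fun e => e.symm, fun e => e.symm⟩

-- at most one word of MAPPING matches at a given position (no word is a prefix of another)
lemma pv_unique (L : List Char) (k : Nat) (wv1 wv2 : List Char × Int)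
    (h1 : wv1 ∈ pyMAPPING) (h2 : wv2 ∈ pyMAPPING)
    (m1 : pvM L k wv1.1 = true) (m2 : pvM L k wv2.1 = true) : wv1 = wv2 := by
  have hpf : ∀ x ∈ pyMAPPING, ∀ y ∈ pyMAPPING,
      x.1.length ≤ y.1.length → y.1.take x.1.length = x.1 → x = y := by decide
  unfold pvM at m1 m2
  rw [beq_iff_eq] at m1 m2
  rcases le_total wv1.1.length wv2.1.length with hle | hle
  · refine hpf wv1 h1 wv2 h2 hle ?_
    rw [← m2, List.take_take, min_eq_left hle, m1]
  · refine (hpf wv2 h2 wv1 h1 hle ?_).symm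
    rw [← m1, List.take_take, min_eq_left hle, m2]

-- a matching word pins the char at k to a letter (so A's digit test is false there), and forces k < length
lemma pv_match_letter (L : List Char) (k : Nat) (wv : List Char × Int)
    (h : wv ∈ pyMAPPING) (m : pvM L k wv.1 = true) :
    ∃ _ : k < L.length, ("0123456789".toList.contains L[k]) = false := by
  unfold pvM at m
  rw [beq_iff_eq] at m
  have hne : wv.1 ≠ [] := by fin_cases h <;> simp
  have hkl : k < L.length := by
    by_contra hk
    rw [List.drop_eq_nil_of_le (by omega), List.take_nil] at m
    exact hne m.symm
  refine ⟨hkl, ?_⟩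
  rw [List.drop_eq_getElem_cons hkl] at m
  fin_cases h <;>
    · first
      | rw [show "one".toList = ['o','n','e'] from rfl] at m
      | rw [show "two".toList = ['t','w','o'] from rfl] at m
      | rw [show "three".toList = ['t','h','r','e','e'] from rfl] at m
      | rw [show "four".toList = ['f','o','u','r'] from rfl] at m
      | rw [show "five".toList = ['f','i','v','e'] from rfl] at m
      | rw [show "six".toList = ['s','i','x'] from rfl] at m
      | rw [show "seven".toList = ['s','e','v','e','n'] from rfl] at m
      | rw [show "eight".toList = ['e','i','g','h','t'] from rfl] at m
      | rw [show "nine".toList = ['n','i','n','e'] from rfl] at m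
      simp only [List.length_cons, List.length_nil, List.take_succ_cons, List.cons.injEq] at m
      rw [m.1]
      decide

-- collapse a flatMap over an if-singleton to the first find? match, given uniqueness
lemma pv_flatMap_ite_find? {α β : Type} [DecidableEq α] (l : List α) (p : α → Bool) (g : α → β)
    (hnd : l.Nodup) (hu : ∀ x ∈ l, ∀ y ∈ l, p x → p y → x = y) :
    l.flatMap (fun x => if p x then [g x] else []) = ((l.find? p).map g).toList := by
  induction l with
  | nil => rfl
  | cons a t ih =>
    rcases List.nodup_cons.mp hnd with ⟨hat, hndt⟩
    by_cases h : p a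
    · have ht : ∀ y ∈ t, ¬ (p y = true) := by
        intro y hy hpy
        exact hat (hu a (by simp) y (by simp [hy]) h hpy ▸ hy)
      have hnil : t.flatMap (fun x => if p x then [g x] else []) = [] := by
        rw [List.flatMap_eq_nil_iff]
        intro x hx
        simp [ht x hx]
      simp [List.flatMap_cons, h, List.find?_cons_of_pos h, hnil]
    · rw [List.flatMap_cons, List.find?_cons_of_neg h, if_neg h,
        ih hndt (fun x hx y hy => hu x (by simp [hx]) y (by simp [hy]))]
      simp
-- every element of a hit block carries its own index
lemma pv_hit_fst (L : List Char) (ic : Int × Char) (x : Int × String)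
    (hx : x ∈ pvHit L ic) : x.1 = ic.1 := by
  unfold pvHit pvTokD pvTokW at hx
  rcases List.mem_append.mp hx with hx | hx
  · split_ifs at hx with h
    · rw [List.mem_singleton.mp hx]
    · simp at hx
  · rcases List.mem_flatMap.mp hx with ⟨wv, _, hx⟩
    split_ifs at hx with h
    · rw [List.mem_singleton.mp hx]
    · simp at hx

-- the word hits at an index collapse to the first MAPPING match
lemma pv_tokW_collapse (L : List Char) (k : Nat) :
    pvTokW L (k : Int) =
      (((pyMAPPING.find? (fun wv => pvM L k wv.1)).map
        (fun wv => ((k : Int), PySem.Int.toStr wv.2))).toList) := by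
  unfold pvTokW
  simp only [pv_pA_cast]
  exact pv_flatMap_ite_find? pyMAPPING (fun wv => pvM L k wv.1)
    (fun wv => ((k : Int), PySem.Int.toStr wv.2)) (by decide)
    (fun x hx y hy => pv_unique L k x y hx hy)

-- no word hit where the char is a digit
lemma pv_tokW_nil_of_digit (L : List Char) (k : Nat) (hk : k < L.length)
    (hd : ("0123456789".toList.contains L[k]) = true) : pvTokW L (k : Int) = [] := by
  rw [pv_tokW_collapse]
  cases hf : pyMAPPING.find? (fun wv => pvM L k wv.1) with
  | none => rfl
  | some wv =>
    exfalso
    have hm : pvM L k wv.1 = true := by simpa using List.find?_some hf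
    rcases pv_match_letter L k wv (List.mem_of_find?_eq_some hf) hm with ⟨_, hcon⟩
    rw [hd] at hcon
    exact Bool.true_eq_false ▸ hcon

-- the canonical hit list is strictly increasing in position
lemma pv_pairwise (L : List Char) :
    (pvC L).Pairwise (fun p q : Int × String => p.1 < q.1) := by
  unfold pvC
  rw [List.pairwise_flatMap]
  constructor
  · intro ic hic
    rcases (PySem.List.mem_enumerate_iff L 0 ic).mp hic with ⟨k, hk, rfl⟩
    simp only [zero_add]
    by_cases hd : ("0123456789".toList.contains L[k]) = true
    · unfold pvHit
      rw [show ((k : Int), L[k]).1 = (k : Int) from rfl, pv_tokW_nil_of_digit L k hk hd]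
      unfold pvTokD
      rw [show ((k : Int), L[k]).2 = L[k] from rfl, if_pos hd]
      simp
    · unfold pvHit pvTokD
      rw [show ((k : Int), L[k]).2 = L[k] from rfl, if_neg hd,
        show ((k : Int), L[k]).1 = (k : Int) from rfl, pv_tokW_collapse]
      cases pyMAPPING.find? (fun wv => pvM L k wv.1) <;> simp
  · refine (PySem.List.pairwise_lt_enumerate L 0).imp ?_
    intro a b hab x hx y hy
    rw [pv_hit_fst L a x hx, pv_hit_fst L b y hy]
    exact hab

-- swapping the two flatMap loops is a permutation
lemma pv_flatMap_swap {α β γ : Type} (l1 : List α) (l2 : List β) (g : α → β → List γ) :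
    (l1.flatMap (fun a => l2.flatMap (g a))).Perm
      (l2.flatMap (fun b => l1.flatMap (fun a => g a b))) := by
  induction l1 with
  | nil => simp
  | cons a t ih =>
    simp only [List.flatMap_cons]
    exact (ih.append_left _).trans
      (List.flatMap_append_perm l2 (g a) (fun b => t.flatMap fun a => g a b))

-- B's raw hit list is a permutation of the canonical one
lemma pv_perm (line : String) :
    (pvC line.toList).Perm
      ((PySem.List.enumerate line.toList).flatMap pvTokD ++
       pyMAPPING.flatMap (fun wv =>
         (PySem.List.pyRange 0 (line.toList.length : Int) 1).flatMap (fun s =>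
           if PySem.Chars.startswith (PySem.List.slice line.toList (some s) none) wv.1
           then [(s, PySem.Int.toStr wv.2)] else []))) := by
  unfold pvC pvHit
  refine (List.flatMap_append_perm _ pvTokD (fun ic => pvTokW line.toList ic.1)).symm.trans ?_
  refine List.Perm.append_left _ ?_
  have h1 : (PySem.List.enumerate line.toList).flatMap (fun ic => pvTokW line.toList ic.1) =
      (PySem.List.pyRange 0 (line.toList.length : Int) 1).flatMap (pvTokW line.toList) := by
    rw [show (PySem.List.enumerate line.toList).flatMap (fun ic => pvTokW line.toList ic.1) =
        ((PySem.List.enumerate line.toList).map (fun x => x.1)).flatMap (pvTokW line.toList) from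
      (List.flatMap_map _ _ _).symm ▸ rfl, PySem.List.map_fst_enumerate]
    norm_num
  rw [h1]
  have h2 : ∀ wv ∈ pyMAPPING, ∀ s ∈ PySem.List.pyRange 0 (line.toList.length : Int) 1,
      (if PySem.List.slice line.toList (some s) (some (s + (wv.1.length : Int))) == wv.1
       then [(s, PySem.Int.toStr wv.2)] else []) =
      (if PySem.Chars.startswith (PySem.List.slice line.toList (some s) none) wv.1
       then [(s, PySem.Int.toStr wv.2)] else []) := by
    intro wv _ s hs
    rcases PySem.List.mem_pyRange_one.mp hs with ⟨hs0, _⟩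
    obtain ⟨k, rfl⟩ : ∃ k : Nat, s = (k : Int) := ⟨s.toNat, (Int.toNat_of_nonneg hs0).symm⟩
    rw [pv_pA_cast, pv_pB_cast]
  refine (pv_flatMap_swap _ pyMAPPING (fun s wv =>
      if PySem.List.slice line.toList (some s) (some (s + (wv.1.length : Int))) == wv.1
      then [(s, PySem.Int.toStr wv.2)] else [])).trans ?_
  apply List.Perm.of_eq
  apply List.flatMap_congr
  intro wv hwv
  exact List.flatMap_congr (fun s hs => h2 wv hwv s hs)

-- B as sorted canonical list
lemma pv_B_eq (line : String) :
    build_number_alt line = (pvC line.toList).map (fun h => h.2) := by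
  have hb1 : (fun (acc : List (Int × String)) (ic : Int × Char) =>
      if ("0123456789".toList.contains ic.2) then acc ++ [(ic.1, String.ofList [ic.2])] else acc) =
      fun acc ic => acc ++ pvTokD ic := by
    funext acc ic
    unfold pvTokD
    by_cases h : ("0123456789".toList.contains ic.2) = true <;> simp only [h] <;> simp
  have hinner : ∀ (wv : List Char × Int) (acc : List (Int × String)),
      (PySem.List.pyRange 0 (line.toList.length : Int) 1).foldl (fun acc2 s =>
        if PySem.Chars.startswith (PySem.List.slice line.toList (some s) none) wv.1
        then acc2 ++ [(s, PySem.Int.toStr wv.2)] else acc2) acc =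
      acc ++ (PySem.List.pyRange 0 (line.toList.length : Int) 1).flatMap (fun s =>
        if PySem.Chars.startswith (PySem.List.slice line.toList (some s) none) wv.1
        then [(s, PySem.Int.toStr wv.2)] else []) := by
    intro wv acc
    have hb : (fun (acc2 : List (Int × String)) s =>
        if PySem.Chars.startswith (PySem.List.slice line.toList (some s) none) wv.1
        then acc2 ++ [(s, PySem.Int.toStr wv.2)] else acc2) =
        fun acc2 s => acc2 ++ (if PySem.Chars.startswith (PySem.List.slice line.toList (some s) none) wv.1
          then [(s, PySem.Int.toStr wv.2)] else []) := by
      funext acc2 s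
      by_cases h : PySem.Chars.startswith (PySem.List.slice line.toList (some s) none) wv.1 = true <;>
        simp [h]
    rw [hb, PySem.List.foldl_append_eq_flatMap]
  have hb2 : (fun (acc : List (Int × String)) (wv : List Char × Int) =>
      (PySem.List.pyRange 0 (line.toList.length : Int) 1).foldl (fun acc2 s =>
        if PySem.Chars.startswith (PySem.List.slice line.toList (some s) none) wv.1
        then acc2 ++ [(s, PySem.Int.toStr wv.2)] else acc2) acc) =
      fun acc wv => acc ++ (PySem.List.pyRange 0 (line.toList.length : Int) 1).flatMap (fun s =>
        if PySem.Chars.startswith (PySem.List.slice line.toList (some s) none) wv.1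
        then [(s, PySem.Int.toStr wv.2)] else []) := by
    funext acc wv
    exact hinner wv acc
  unfold build_number_alt
  dsimp only
  rw [hb1, PySem.List.foldl_append_eq_flatMap, hb2, PySem.List.foldl_append_eq_flatMap,
    List.nil_append]
  rw [PySem.List.sorted_eq_of_perm_of_pairwise_lt _ (pvC line.toList) (fun h => h.1)
    (pv_perm line) (pv_pairwise line.toList)]

-- map snd of canonical = A's token lists
lemma pv_C_map_snd (line : String) :
    (pvC line.toList).map (fun h => h.2) = build_number line := by
  rw [pv_A_flatMap]
  unfold pvC
  rw [List.map_flatMap]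
  apply List.flatMap_congr
  intro ic hic
  rcases (PySem.List.mem_enumerate_iff line.toList 0 ic).mp hic with ⟨k, hk, rfl⟩
  simp only [zero_add]
  unfold pvHit pvTokA
  rw [List.map_append]
  congr 1
  · unfold pvTokD
    rw [show ((k : Int), line.toList[k]).2 = line.toList[k] from rfl]
    by_cases hd : ("0123456789".toList.contains line.toList[k]) = true <;> simp only [hd] <;> simp
  · rw [show ((k : Int), line.toList[k]).1 = (k : Int) from rfl, pv_tokW_collapse]
    simp only [pv_pA_cast]
    cases pyMAPPING.find? (fun wv => pvM line.toList k wv.1) <;> simp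

-- ===== VERDICT (by name: the statement is the Claim_ definition above) =====
theorem build_number_spec : Claim_equal_build_number := by
  intro line _
  unfold Spec_build_number
  rw [pv_B_eq, pv_C_map_snd]
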